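-- pv_equiv track=rewrite | github.com/vrajeshsh/python-practice | 08. Double Dimensional Array/06. List Comprehension Applns/10. Boundary Sort and Sum.py | getSortedBoundary
-- ===== SOURCE A (Python) =====
-- def getSortedBoundary(num, r, c):
--     rearranged = sorted([num[i][j] for i in range(r) for j in range(c) if i==0 or i==r-1 or j==0 or j==c-1])
--     # Put the sorted elements BACK to the new matrix and return it in the same way as the
--     # sorted functions done in the sort rows,
--     k, n = 0, len(rearranged)-1
--     new2D = [row[:] for row in num]
--     for i in range(r):
--         for j in range(c):
--             if i==0 or j==c-1:
--                 new2D[i][j] = rearranged[k]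
--                 k+=1
--             elif i==r-1 or j==0:
--                 new2D[i][j]=rearranged[n]
--                 n-=1
--
--     return new2D
-- ===== SOURCE B (Python) =====
-- def getSortedBoundary(num, r, c):
--     # Build the clockwise boundary path, sort the boundary values, assign them along the path.
--     path = []
--     if r > 0 and c > 0:
--         path += [(0, j) for j in range(c)]               # top row, left to right
--         path += [(i, c - 1) for i in range(1, r)]        # right column, top to bottom
--         if r > 1:
--             path += [(r - 1, j) for j in range(c - 2, -1, -1)]  # bottom row, right to left
--         if c > 1:
--             path += [(i, 0) for i in range(r - 2, 0, -1)]       # left column, bottom to top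
--     vals = sorted(num[i][j] for (i, j) in path)
--     new2D = [row[:] for row in num]
--     for (i, j), v in zip(path, vals):
--         new2D[i][j] = v
--     return new2D
-- ===== Notes on version B (the rewrite author's own statement) =====
-- stated objective: alternative
-- what changed: Replaces A's row-major double loop with front/back index pointers by an explicit clockwise boundary path built once, then a single flat pass assigning the sorted values along that path.
import Mathlib
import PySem

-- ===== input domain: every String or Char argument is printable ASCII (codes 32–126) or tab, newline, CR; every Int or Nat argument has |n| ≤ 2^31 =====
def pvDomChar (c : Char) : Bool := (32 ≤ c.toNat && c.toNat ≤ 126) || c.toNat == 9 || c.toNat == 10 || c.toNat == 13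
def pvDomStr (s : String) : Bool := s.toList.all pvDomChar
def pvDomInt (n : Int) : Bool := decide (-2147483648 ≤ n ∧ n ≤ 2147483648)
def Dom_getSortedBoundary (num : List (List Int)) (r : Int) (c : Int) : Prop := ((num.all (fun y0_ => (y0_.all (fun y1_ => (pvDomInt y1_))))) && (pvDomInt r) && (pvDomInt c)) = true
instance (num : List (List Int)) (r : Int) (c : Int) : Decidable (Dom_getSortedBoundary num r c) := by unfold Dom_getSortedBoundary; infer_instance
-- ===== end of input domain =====

-- B rebuilds the same result by an explicit clockwise boundary path plus one flat
-- assignment pass instead of A's row-major double loop with front/back pointers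
-- (objective: alternative decomposition; neither version mutates its argument).

-- shared primitive: the Python statement `m[i][j] = v` (both sources contain it verbatim)
def pvSet2 (m : List (List Int)) (i j v : Int) : List (List Int) :=
  PySem.List.pySetD m i (PySem.List.pySetD (PySem.List.pyGetD m i []) j v)

-- ===== PORT A =====
-- loop body of A's nested placement loop over state (k, n, new2D)
def pvStepA (s : List Int) (r c : Int) (st : Int × Int × List (List Int)) (p : Int × Int) :
    Int × Int × List (List Int) :=
  if p.1 == 0 || p.2 == c - 1 then
    (st.1 + 1, st.2.1, pvSet2 st.2.2 p.1 p.2 (PySem.List.pyGetD s st.1 0))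
  else if p.1 == r - 1 || p.2 == 0 then
    (st.1, st.2.1 - 1, pvSet2 st.2.2 p.1 p.2 (PySem.List.pyGetD s st.2.1 0))
  else st

def getSortedBoundary (num : List (List Int)) (r : Int) (c : Int) : List (List Int) :=
  let rearranged := PySem.List.sorted
    ((PySem.List.pyRange 0 r 1).flatMap (fun i =>
      ((PySem.List.pyRange 0 c 1).filter
          (fun j => i == 0 || i == r - 1 || j == 0 || j == c - 1)).map
        (fun j => PySem.List.pyGetD (PySem.List.pyGetD num i []) j 0)))
    (fun x => x) false
  let new2D := num.map (fun row => row)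
  ((PySem.List.pyRange 0 r 1).foldl (fun st i =>
      (PySem.List.pyRange 0 c 1).foldl (fun st j => pvStepA rearranged r c st (i, j)) st)
    (0, (rearranged.length : Int) - 1, new2D)).2.2

-- ===== PORT B =====
def getSortedBoundary_alt (num : List (List Int)) (r : Int) (c : Int) : List (List Int) :=
  let path : List (Int × Int) :=
    if 0 < r ∧ 0 < c then
      ((PySem.List.pyRange 0 c 1).map (fun j => ((0 : Int), j)))
      ++ ((PySem.List.pyRange 1 r 1).map (fun i => (i, c - 1)))
      ++ (if 1 < r then (PySem.List.pyRange (c - 2) (-1) (-1)).map (fun j => (r - 1, j)) else [])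
      ++ (if 1 < c then (PySem.List.pyRange (r - 2) 0 (-1)).map (fun i => (i, (0 : Int))) else [])
    else []
  let vals := PySem.List.sorted
    (path.map (fun p => PySem.List.pyGetD (PySem.List.pyGetD num p.1 []) p.2 0)) (fun x => x) false
  let new2D := num.map (fun row => row)
  (path.zip vals).foldl (fun m pv => pvSet2 m pv.1.1 pv.1.2 pv.2) new2D

-- ===== PRECONDITION & SPEC =====
-- Pre_ excludes exactly the inputs where the Python A raises IndexError: a positive
-- requested shape reaching outside num (r > len(num), or one of the first r rows
-- shorter than c).
def Pre_getSortedBoundary (num : List (List Int)) (r : Int) (c : Int) : Prop :=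
  0 < r → 0 < c → (r ≤ (num.length : Int) ∧ ∀ row ∈ num.take r.toNat, c ≤ (row.length : Int))
instance (num : List (List Int)) (r : Int) (c : Int) : Decidable (Pre_getSortedBoundary num r c) := by
  unfold Pre_getSortedBoundary; infer_instance

def pvWitness_getSortedBoundary : List (List Int) × Int × Int := ([[3, 1], [4, 2]], 2, 2)

def Spec_getSortedBoundary (num : List (List Int)) (r : Int) (c : Int) (out : List (List Int)) : Prop := out = getSortedBoundary_alt num r c
instance (num : List (List Int)) (r : Int) (c : Int) (out : List (List Int)) : Decidable (Spec_getSortedBoundary num r c out) := by unfold Spec_getSortedBoundary; infer_instance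

-- ===== CLAIM (what is proved, stated in full; the proofs are below) =====
def Claim_equal_getSortedBoundary : Prop := ∀ (num : List (List Int)) (r : Int) (c : Int), Dom_getSortedBoundary num r c → Pre_getSortedBoundary num r c → Spec_getSortedBoundary num r c (getSortedBoundary num r c)

-- ===== LEMMAS AND PROOFS =====

-- proof-side vocabulary
def pvApply (m : List (List Int)) (a : (Int × Int) × Int) : List (List Int) :=
  pvSet2 m a.1.1 a.1.2 a.2

def pvNSet (m : List (List Int)) (i j : Nat) (v : Int) : List (List Int) :=
  m.set i ((m.getD i []).set j v)

def pvWithAsc (s : List Int) : List (Int × Int) → Int → List ((Int × Int) × Int)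
  | [], _ => []
  | p :: rest, k => (p, PySem.List.pyGetD s k 0) :: pvWithAsc s rest (k + 1)

def pvWithDesc (s : List Int) : List (Int × Int) → Int → List ((Int × Int) × Int)
  | [], _ => []
  | p :: rest, n => (p, PySem.List.pyGetD s n 0) :: pvWithDesc s rest (n - 1)

def pvFront (c : Int) (p : Int × Int) : Bool := p.1 == 0 || p.2 == c - 1
def pvBack (r c : Int) (p : Int × Int) : Bool := !(pvFront c p) && (p.1 == r - 1 || p.2 == 0)
def pvBound (r c : Int) (p : Int × Int) : Bool := pvFront c p || pvBack r c p

def pvAssocA (s : List Int) (r c : Int) : List (Int × Int) → Int → Int → List ((Int × Int) × Int)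
  | [], _, _ => []
  | p :: rest, k, n =>
    if p.1 == 0 || p.2 == c - 1 then
      (p, PySem.List.pyGetD s k 0) :: pvAssocA s r c rest (k + 1) n
    else if p.1 == r - 1 || p.2 == 0 then
      (p, PySem.List.pyGetD s n 0) :: pvAssocA s r c rest k (n - 1)
    else pvAssocA s r c rest k n

def pvGrid (r c : Int) : List (Int × Int) :=
  (PySem.List.pyRange 0 r 1).flatMap (fun i => (PySem.List.pyRange 0 c 1).map (fun j => (i, j)))

def pvVal (num : List (List Int)) (p : Int × Int) : Int :=
  PySem.List.pyGetD (PySem.List.pyGetD num p.1 []) p.2 0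

-- small generic lemmas
theorem pv_flatMap_single {α β : Type} (l : List α) (f : α → β) :
    l.flatMap (fun a => [f a]) = l.map f := by
  induction l with
  | nil => simp
  | cons a l ih => simp [ih]

theorem pv_zip_take_of_le {α β : Type} :
    ∀ (l : List α) (l' : List β) (n : Nat), l.length ≤ n → l.zip (l'.take n) = l.zip l'
  | [], _, _, _ => by simp
  | a :: l, [], n, _ => by simp
  | a :: l, b :: l', 0, h => by simp at h
  | a :: l, b :: l', n + 1, h => by
    simp only [List.take_succ_cons, List.zip_cons_cons]
    rw [pv_zip_take_of_le l l' n (by simpa using h)]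

theorem pvGetD_nonneg {α : Type} (xs : List α) (i : Int) (d : α) (h : 0 ≤ i) :
    PySem.List.pyGetD xs i d = xs.getD i.toNat d := by
  by_cases hlt : i < (xs.length : Int)
  · rw [PySem.List.pyGetD_eq_getElem xs d h hlt, List.getD_eq_getElem?_getD,
      List.getElem?_eq_getElem (by omega), Option.getD_some]
  · rw [PySem.List.pyGetD_of_none, List.getD_eq_default]
    · omega
    · rw [PySem.List.pyGet?_eq_none_iff]
      intro hin
      exact hlt hin.2

theorem pvSet2_eq (m : List (List Int)) (i j v : Int) (hi : 0 ≤ i) (hj : 0 ≤ j) :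
    pvSet2 m i j v = pvNSet m i.toNat j.toNat v := by
  unfold pvSet2 pvNSet
  rw [PySem.List.pySetD_of_nonneg _ _ hi, PySem.List.pySetD_of_nonneg _ _ hj,
    pvGetD_nonneg _ _ _ hi]

theorem pvNSet_comm (m : List (List Int)) (i j i' j' : Nat) (v v' : Int)
    (h : (i, j) ≠ (i', j')) :
    pvNSet (pvNSet m i j v) i' j' v' = pvNSet (pvNSet m i' j' v') i j v := by
  unfold pvNSet
  by_cases hii : i = i'
  · subst hii
    have hjj : j ≠ j' := by
      intro hj; exact h (by rw [hj])
    by_cases hlen : i < m.length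
    · have h1 : (m.set i ((m.getD i []).set j v)).getD i [] = (m.getD i []).set j v := by
        rw [List.getD_eq_getElem?_getD, List.getElem?_set_self hlen, Option.getD_some]
      have h2 : (m.set i ((m.getD i []).set j' v')).getD i [] = (m.getD i []).set j' v' := by
        rw [List.getD_eq_getElem?_getD, List.getElem?_set_self hlen, Option.getD_some]
      rw [h1, h2, List.set_set, List.set_set, List.set_comm _ _ hjj]
    · have e : ∀ (x : List Int), m.set i x = m :=
        fun x => List.set_eq_of_length_le (by omega)
      simp only [e]
  · have h1 : (m.set i ((m.getD i []).set j v)).getD i' [] = m.getD i' [] := by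
      rw [List.getD_eq_getElem?_getD, List.getElem?_set_ne hii, ← List.getD_eq_getElem?_getD]
    have h2 : (m.set i' ((m.getD i' []).set j' v')).getD i [] = m.getD i [] := by
      rw [List.getD_eq_getElem?_getD, List.getElem?_set_ne (fun hh => hii hh.symm),
        ← List.getD_eq_getElem?_getD]
    rw [h1, h2, List.set_comm _ _ hii]

theorem pvApply_comm (x y : (Int × Int) × Int)
    (hx : 0 ≤ x.1.1 ∧ 0 ≤ x.1.2) (hy : 0 ≤ y.1.1 ∧ 0 ≤ y.1.2)
    (hne : x.1 ≠ y.1) (m : List (List Int)) :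
    pvApply (pvApply m x) y = pvApply (pvApply m y) x := by
  obtain ⟨⟨xi, xj⟩, xv⟩ := x
  obtain ⟨⟨yi, yj⟩, yv⟩ := y
  simp only [pvApply] at *
  rw [pvSet2_eq _ _ _ _ hx.1 hx.2, pvSet2_eq _ _ _ _ hy.1 hy.2,
    pvSet2_eq _ _ _ _ hy.1 hy.2, pvSet2_eq _ _ _ _ hx.1 hx.2]
  apply pvNSet_comm
  intro hh
  apply hne
  have h1 : xi.toNat = yi.toNat := congrArg Prod.fst hh
  have h2 : xj.toNat = yj.toNat := congrArg Prod.snd hh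
  have : xi = yi := by omega
  have : xj = yj := by omega
  simp_all

theorem pv_foldl_apply_perm (L1 L2 : List ((Int × Int) × Int)) (h : L1.Perm L2)
    (hnd : (L1.map Prod.fst).Nodup)
    (hnn : ∀ a ∈ L1, 0 ≤ a.1.1 ∧ 0 ≤ a.1.2) (m : List (List Int)) :
    L1.foldl pvApply m = L2.foldl pvApply m := by
  refine List.Perm.foldl_eq' h ?_ m
  intro x hx y hy z
  by_cases hxy : x = y
  · subst hxy; rfl
  · exact pvApply_comm x y (hnn x hx) (hnn y hy)
      (fun hk => hxy (List.inj_on_of_nodup_map hnd hx hy hk)) z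

-- withAsc / withDesc bookkeeping
theorem pv_map_fst_withAsc (s : List Int) :
    ∀ (cells : List (Int × Int)) (k : Int), (pvWithAsc s cells k).map Prod.fst = cells
  | [], _ => by simp [pvWithAsc]
  | p :: rest, k => by simp [pvWithAsc, pv_map_fst_withAsc s rest (k + 1)]

theorem pv_map_fst_withDesc (s : List Int) :
    ∀ (cells : List (Int × Int)) (n : Int), (pvWithDesc s cells n).map Prod.fst = cells
  | [], _ => by simp [pvWithDesc]
  | p :: rest, n => by simp [pvWithDesc, pv_map_fst_withDesc s rest (n - 1)]

theorem pv_withAsc_append (s : List Int) :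
    ∀ (l1 l2 : List (Int × Int)) (k : Int),
      pvWithAsc s (l1 ++ l2) k = pvWithAsc s l1 k ++ pvWithAsc s l2 (k + l1.length)
  | [], l2, k => by simp [pvWithAsc]
  | p :: rest, l2, k => by
    simp only [List.cons_append, pvWithAsc, pv_withAsc_append s rest l2 (k + 1),
      List.length_cons]
    push_cast
    have e : k + ((rest.length : Int) + 1) = k + 1 + (rest.length : Int) := by ring
    rw [e]

theorem pv_withDesc_eq (s : List Int) :
    ∀ (cells : List (Int × Int)) (n : Int),
      pvWithDesc s cells n = (pvWithAsc s cells.reverse (n + 1 - cells.length)).reverse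
  | [], n => by simp [pvWithDesc, pvWithAsc]
  | p :: rest, n => by
    rw [pvWithDesc, pv_withDesc_eq s rest (n - 1)]
    rw [List.reverse_cons, pv_withAsc_append]
    rw [List.reverse_append]
    simp only [List.length_reverse, List.length_cons, pvWithAsc, List.reverse_cons,
      List.reverse_nil, List.nil_append]
    have e1 : n + 1 - ((rest.length : Int) + 1) + (rest.length : Int) = n := by ring
    have e2 : n + 1 - ((rest.length : Int) + 1) = n - 1 + 1 - (rest.length : Int) := by ring
    push_cast
    rw [e1, e2]
    simp

theorem pv_withAsc_eq_zip (s : List Int) :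
    ∀ (cells : List (Int × Int)) (k : Nat), k + cells.length ≤ s.length →
      pvWithAsc s cells (k : Int) = cells.zip (s.drop k)
  | [], k, _ => by simp [pvWithAsc]
  | p :: rest, k, h => by
    have hk : k < s.length := by simp at h; omega
    rw [pvWithAsc, List.drop_eq_getElem_cons hk, List.zip_cons_cons]
    have h1 : PySem.List.pyGetD s (k : Int) 0 = s[k] := by
      rw [PySem.List.pyGetD_eq_getElem s 0 (by omega) (by simp; omega)]
      simp
    rw [h1]
    have h2 : ((k : Int) + 1) = ((k + 1 : Nat) : Int) := by push_cast; ring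
    rw [h2, pv_withAsc_eq_zip s rest (k + 1) (by simp at h ⊢; omega)]

-- A's placement loop as an association-list fold
theorem pv_foldA (s : List Int) (r c : Int) :
    ∀ (cells : List (Int × Int)) (k n : Int) (m : List (List Int)),
      (cells.foldl (pvStepA s r c) (k, n, m)).2.2
        = (pvAssocA s r c cells k n).foldl pvApply m := by
  intro cells
  induction cells with
  | nil => intro k n m; simp [pvAssocA]
  | cons p rest ih =>
    intro k n m
    by_cases h1 : (p.1 == 0 || p.2 == c - 1) = true
    · simp only [List.foldl_cons, pvStepA, pvAssocA, h1, if_true]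
      rw [ih]
      rfl
    · by_cases h2 : (p.1 == r - 1 || p.2 == 0) = true
      · simp only [List.foldl_cons, pvStepA, pvAssocA, h1, h2, if_true, if_false,
          Bool.false_eq_true]
        rw [ih]
        rfl
      · simp only [List.foldl_cons, pvStepA, pvAssocA, h1, h2, if_false,
          Bool.false_eq_true]
        exact ih k n m

theorem pv_assocA_perm (s : List Int) (r c : Int) :
    ∀ (cells : List (Int × Int)) (k n : Int),
      (pvAssocA s r c cells k n).Perm
        (pvWithAsc s (cells.filter (pvFront c)) k
          ++ pvWithDesc s (cells.filter (pvBack r c)) n) := by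
  intro cells
  induction cells with
  | nil => intro k n; simp [pvAssocA, pvWithAsc, pvWithDesc]
  | cons p rest ih =>
    intro k n
    by_cases h1 : (p.1 == 0 || p.2 == c - 1) = true
    · have hf : pvFront c p = true := h1
      have hb : pvBack r c p = false := by simp [pvBack, hf]
      simp only [pvAssocA, h1, if_true, List.filter_cons, hf, hb, Bool.false_eq_true,
        if_false, pvWithAsc]
      exact (ih (k + 1) n).cons _
    · have hf : pvFront c p = false := by simpa [pvFront] using h1
      by_cases h2 : (p.1 == r - 1 || p.2 == 0) = true
      · have hb : pvBack r c p = true := by simp [pvBack, hf, h2]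
        simp only [pvAssocA, h1, h2, if_true, if_false, Bool.false_eq_true,
          List.filter_cons, hf, hb, pvWithDesc]
        refine ((ih k (n - 1)).cons _).trans ?_
        exact List.perm_middle.symm
      · have hb : pvBack r c p = false := by simp [pvBack, hf, h2]
        simp only [pvAssocA, h1, h2, if_false, Bool.false_eq_true, List.filter_cons,
          hf, hb]
        exact ih k n

-- disjoint filters split a filtered list
theorem pv_filter_or_perm {α : Type} (p q : α → Bool)
    (hdisj : ∀ x, p x = true → q x = false) :
    ∀ l : List α, (l.filter (fun x => p x || q x)).Perm (l.filter p ++ l.filter q) := by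
  intro l
  induction l with
  | nil => simp
  | cons a l ih =>
    by_cases hp : p a = true
    · have hq := hdisj a hp
      simp only [List.filter_cons, hp, hq, Bool.true_or, if_true, Bool.false_eq_true,
        if_false, List.cons_append]
      exact ih.cons a
    · have hp' : p a = false := by simpa using hp
      by_cases hq : q a = true
      · simp only [List.filter_cons, hp', hq, Bool.false_or, if_true, Bool.false_eq_true,
          if_false]
        exact (ih.cons a).trans List.perm_middle.symm
      · have hq' : q a = false := by simpa using hq
        simp only [List.filter_cons, hp', hq', Bool.false_or, Bool.false_eq_true, if_false]
        exact ih

-- the grid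
theorem pvGrid_nodup (r c : Int) : (pvGrid r c).Nodup := by
  have e : pvGrid r c = (PySem.List.pyRange 0 r 1) ×ˢ (PySem.List.pyRange 0 c 1) := rfl
  rw [e]
  exact List.Nodup.product (PySem.List.nodup_pyRange_one 0 r) (PySem.List.nodup_pyRange_one 0 c)

theorem pvGrid_mem (r c : Int) (p : Int × Int) (h : p ∈ pvGrid r c) : 0 ≤ p.1 ∧ 0 ≤ p.2 := by
  obtain ⟨i, j⟩ := p
  simp only [pvGrid, List.mem_flatMap, List.mem_map, PySem.List.mem_pyRange_one,
    Prod.mk.injEq] at h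
  obtain ⟨a, ha, b, hb, hab⟩ := h
  obtain ⟨h1, h2⟩ := hab
  subst h1; subst h2
  exact ⟨ha.1, hb.1⟩

-- concrete filter computations
theorem pv_filter_last (c : Int) (hc : 0 < c) :
    (PySem.List.pyRange 0 c 1).filter (fun j => j == c - 1) = [c - 1] := by
  rw [PySem.List.pyRange_one_append 0 (c - 1) c (by omega) (by omega), List.filter_append,
    PySem.List.pyRange_one_cons (show c - 1 < c by omega),
    PySem.List.pyRange_one_eq_nil (show c ≤ c - 1 + 1 by omega)]
  rw [List.filter_eq_nil_iff.mpr ?_]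
  · simp
  · intro a ha
    rw [PySem.List.mem_pyRange_one] at ha
    simp
    omega

theorem pv_filter_first (c : Int) (hc : 1 < c) :
    (PySem.List.pyRange 0 c 1).filter (fun j => !(j == c - 1) && (j == 0)) = [0] := by
  rw [PySem.List.pyRange_one_cons (show (0:Int) < c by omega), List.filter_cons]
  have h0 : (!((0:Int) == c - 1) && ((0:Int) == 0)) = true := by
    simp
    omega
  rw [if_pos h0, List.filter_eq_nil_iff.mpr ?_]
  · intro a ha
    rw [PySem.List.mem_pyRange_one] at ha
    simp
    intro _
    omega

theorem pv_filter_notlast (c : Int) (hc : 0 < c) :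
    (PySem.List.pyRange 0 c 1).filter (fun j => !(j == c - 1)) = PySem.List.pyRange 0 (c - 1) 1 := by
  rw [PySem.List.pyRange_one_append 0 (c - 1) c (by omega) (by omega), List.filter_append,
    PySem.List.pyRange_one_cons (show c - 1 < c by omega),
    PySem.List.pyRange_one_eq_nil (show c ≤ c - 1 + 1 by omega)]
  rw [List.filter_eq_self.mpr ?_, List.filter_cons, if_neg ?_]
  · simp
  · simp
  · intro a ha
    rw [PySem.List.mem_pyRange_one] at ha
    simp
    omega

theorem pv_filter_front (r c : Int) (hr : 0 < r) (hc : 0 < c) :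
    (pvGrid r c).filter (pvFront c)
      = (PySem.List.pyRange 0 c 1).map (fun j => ((0 : Int), j))
        ++ (PySem.List.pyRange 1 r 1).map (fun i => (i, c - 1)) := by
  unfold pvGrid
  rw [List.filter_flatMap, PySem.List.pyRange_one_cons hr, List.flatMap_cons]
  congr 1
  · rw [List.filter_map]
    have e : (pvFront c ∘ fun j => ((0 : Int), j)) = fun _ => true := by
      funext j
      simp [pvFront, Function.comp]
    rw [e, List.filter_true]
  · have step : ∀ i ∈ PySem.List.pyRange (0 + 1) r 1,
        ((PySem.List.pyRange 0 c 1).map (fun j => (i, j))).filter (pvFront c) = [(i, c - 1)] := by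
      intro i hi
      rw [PySem.List.mem_pyRange_one] at hi
      rw [List.filter_map]
      have e : (pvFront c ∘ fun j => (i, j)) = fun j => j == c - 1 := by
        funext j
        simp [pvFront, Function.comp]
        omega
      rw [e, pv_filter_last c hc]
      simp
    rw [List.flatMap_def, List.map_congr_left step, ← List.flatMap_def, pv_flatMap_single]
    norm_num

theorem pv_filter_back (r c : Int) (hr : 0 < r) (hc : 0 < c) :
    (pvGrid r c).filter (pvBack r c)
      = (if 1 < c then (PySem.List.pyRange 1 (r - 1) 1).map (fun i => (i, (0 : Int))) else [])
        ++ (if 1 < r then (PySem.List.pyRange 0 (c - 1) 1).map (fun j => (r - 1, j)) else []) := by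
  unfold pvGrid
  rw [List.filter_flatMap]
  have row0 : ((PySem.List.pyRange 0 c 1).map (fun j => ((0:Int), j))).filter (pvBack r c) = [] := by
    rw [List.filter_map, List.filter_eq_nil_iff.mpr ?_]
    · simp
    · intro j hj
      simp [pvBack, pvFront, Function.comp]
  by_cases hr1 : 1 < r
  · rw [PySem.List.pyRange_one_append 0 1 r (by omega) (by omega),
      PySem.List.pyRange_one_append 1 (r - 1) r (by omega) (by omega),
      PySem.List.pyRange_one_cons (show (0:Int) < 1 by omega),
      PySem.List.pyRange_one_eq_nil (show (1:Int) ≤ 0 + 1 by omega),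
      PySem.List.pyRange_one_cons (show r - 1 < r by omega),
      PySem.List.pyRange_one_eq_nil (show r ≤ r - 1 + 1 by omega)]
    rw [List.flatMap_append, List.flatMap_append, List.flatMap_cons, List.flatMap_nil,
      List.flatMap_cons, List.flatMap_nil]
    rw [row0]
    simp only [List.nil_append, List.append_nil]
    congr 1
    · -- middle rows
      have step : ∀ i ∈ PySem.List.pyRange 1 (r - 1) 1,
          ((PySem.List.pyRange 0 c 1).map (fun j => (i, j))).filter (pvBack r c)
            = (if 1 < c then [(i, (0:Int))] else []) := by
        intro i hi
        rw [PySem.List.mem_pyRange_one] at hi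
        rw [List.filter_map]
        have e : (pvBack r c ∘ fun j => (i, j)) = fun j => !(j == c - 1) && (j == 0) := by
          funext j
          simp only [pvBack, pvFront, Function.comp]
          have e1 : (i == (0:Int)) = false := by simp; omega
          have e2 : (i == r - 1) = false := by simp; omega
          rw [e1, e2]
          simp
        rw [e]
        by_cases hc1 : 1 < c
        · rw [pv_filter_first c hc1, if_pos hc1]
          simp
        · have hce : c = 1 := by omega
          subst hce
          rw [if_neg hc1]
          rw [List.filter_eq_nil_iff.mpr ?_]
          · simp
          · intro j hj
            cases h : (j == (0:Int)) <;> simp [h]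
      rw [List.flatMap_def, List.map_congr_left step, ← List.flatMap_def]
      by_cases hc1 : 1 < c
      · simp only [hc1, if_true]
        rw [pv_flatMap_single]
      · simp only [hc1, if_false]
        simp
    · -- last row
      rw [List.filter_map]
      have e : (pvBack r c ∘ fun j => (r - 1, j)) = fun j => !(j == c - 1) := by
        funext j
        simp only [pvBack, pvFront, Function.comp]
        have e1 : (r - 1 == (0:Int)) = false := by simp; omega
        have e2 : (r - 1 == r - 1) = true := by simp
        rw [e1, e2]
        simp
      rw [e, pv_filter_notlast c hc, if_pos hr1]
  · have hre : r = 1 := by omega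
    subst hre
    rw [PySem.List.pyRange_one_cons (show (0:Int) < 1 by omega),
      PySem.List.pyRange_one_eq_nil (show (1:Int) ≤ 0 + 1 by omega)]
    rw [List.flatMap_cons, List.flatMap_nil, row0]
    have e : PySem.List.pyRange 1 (1 - 1 : Int) 1 = [] := PySem.List.pyRange_one_eq_nil (by omega)
    simp only [e]
    simp

theorem pv_bound_eq (r c i j : Int) :
    pvBound r c (i, j) = (i == 0 || i == r - 1 || j == 0 || j == c - 1) := by
  simp only [pvBound, pvFront, pvBack]
  cases h1 : (i == (0:Int)) <;> cases h2 : (i == r - 1) <;> cases h3 : (j == (0:Int)) <;>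
    cases h4 : (j == c - 1) <;> simp_all

theorem pv_rearranged_eq (num : List (List Int)) (r c : Int) :
    ((PySem.List.pyRange 0 r 1).flatMap (fun i =>
      ((PySem.List.pyRange 0 c 1).filter
          (fun j => i == 0 || i == r - 1 || j == 0 || j == c - 1)).map
        (fun j => PySem.List.pyGetD (PySem.List.pyGetD num i []) j 0)))
    = ((pvGrid r c).filter (pvBound r c)).map (pvVal num) := by
  unfold pvGrid
  rw [List.filter_flatMap, List.map_flatMap]
  congr 1
  funext i
  rw [List.filter_map, List.map_map]
  rw [List.filter_congr (fun j _ => (show (pvBound r c ∘ fun j => (i, j)) j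
      = (fun j => i == 0 || i == r - 1 || j == 0 || j == c - 1) j from pv_bound_eq r c i j))]
  rfl

theorem pv_sorted_congr (xs ys : List Int) (h : xs.Perm ys) :
    PySem.List.sorted xs (fun x => x) false = PySem.List.sorted ys (fun x => x) false := by
  exact (PySem.List.sorted_id_eq_of_perm_of_pairwise xs
    (PySem.List.sorted ys (fun x : Int => x) false)
    ((PySem.List.sorted_perm ys (fun x : Int => x) false).trans h.symm)
    (PySem.List.sorted_pairwise ys (fun x : Int => x)))

-- named intermediate lists
def pvF (r c : Int) : List (Int × Int) := (pvGrid r c).filter (pvFront c)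
def pvK (r c : Int) : List (Int × Int) := (pvGrid r c).filter (pvBack r c)
def pvS (num : List (List Int)) (r c : Int) : List Int :=
  PySem.List.sorted (((pvGrid r c).filter (pvBound r c)).map (pvVal num)) (fun x => x) false
def pvP (r c : Int) : List (Int × Int) := pvF r c ++ (pvK r c).reverse
def pvV (num : List (List Int)) (r c : Int) : List Int :=
  PySem.List.sorted ((pvP r c).map (pvVal num)) (fun x => x) false

theorem pv_foldl_const {α β : Type} (l : List α) (init : β) :
    l.foldl (fun st _ => st) init = init := by
  induction l with
  | nil => rfl
  | cons a l ih => exact ih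

theorem pv_disj (r c : Int) : ∀ x, pvFront c x = true → pvBack r c x = false := by
  intro x hx
  simp [pvBack, hx]

theorem pv_nodup_FK (r c : Int) : (pvF r c ++ pvK r c).Nodup := by
  rw [List.nodup_append]
  refine ⟨(pvGrid_nodup r c).filter _, (pvGrid_nodup r c).filter _, ?_⟩
  intro a ha b hb heq
  have h1 := (List.mem_filter.mp ha).2
  have h2 := (List.mem_filter.mp hb).2
  rw [heq] at h1
  rw [pv_disj r c b h1] at h2
  exact Bool.false_ne_true h2

theorem pv_len_S (num : List (List Int)) (r c : Int) :
    (pvS num r c).length = (pvF r c).length + (pvK r c).length := by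
  unfold pvS
  rw [PySem.List.length_sorted, List.length_map]
  have e : pvBound r c = fun x => pvFront c x || pvBack r c x := rfl
  rw [e, (pv_filter_or_perm (pvFront c) (pvBack r c) (pv_disj r c) (pvGrid r c)).length_eq,
    List.length_append]
  rfl

theorem pv_V_eq_S (num : List (List Int)) (r c : Int) : pvV num r c = pvS num r c := by
  unfold pvV pvS
  apply pv_sorted_congr
  unfold pvP
  rw [List.map_append, List.map_reverse]
  refine (List.Perm.append_left _ ((List.map (pvVal num) (pvK r c)).reverse_perm)).trans ?_
  rw [← List.map_append]
  have e : pvBound r c = fun x => pvFront c x || pvBack r c x := rfl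
  rw [e]
  exact ((pv_filter_or_perm (pvFront c) (pvBack r c) (pv_disj r c) (pvGrid r c)).map
    (pvVal num)).symm

theorem pv_zip_eq (num : List (List Int)) (r c : Int) :
    (pvP r c).zip (pvS num r c)
      = pvWithAsc (pvS num r c) (pvF r c) 0
        ++ pvWithAsc (pvS num r c) (pvK r c).reverse ((pvF r c).length : Int) := by
  have hlen := pv_len_S num r c
  unfold pvP
  conv_lhs => rw [← List.take_append_drop (pvF r c).length (pvS num r c)]
  rw [List.zip_append (by rw [List.length_take]; omega)]
  congr 1
  · rw [pv_zip_take_of_le _ _ _ (le_refl _)]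
    have h := pv_withAsc_eq_zip (pvS num r c) (pvF r c) 0 (by omega)
    rw [List.drop_zero] at h
    simp only [Nat.cast_zero] at h
    exact h.symm
  · have h := pv_withAsc_eq_zip (pvS num r c) (pvK r c).reverse (pvF r c).length
      (by rw [List.length_reverse]; omega)
    exact h.symm

theorem pv_desc_eq (num : List (List Int)) (r c : Int) :
    pvWithDesc (pvS num r c) (pvK r c) (((pvS num r c).length : Int) - 1)
      = (pvWithAsc (pvS num r c) (pvK r c).reverse ((pvF r c).length : Int)).reverse := by
  have hlen := pv_len_S num r c
  rw [pv_withDesc_eq]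
  congr 2
  omega

-- the core equality between A's nested placement loop and B's flat pass, on the
-- nonempty shape
theorem pv_core (num : List (List Int)) (r c : Int) (m0 : List (List Int)) :
    ((PySem.List.pyRange 0 r 1).foldl (fun st i =>
        (PySem.List.pyRange 0 c 1).foldl (fun st j => pvStepA (pvS num r c) r c st (i, j)) st)
      (0, ((pvS num r c).length : Int) - 1, m0)).2.2
    = ((pvP r c).zip (pvV num r c)).foldl pvApply m0 := by
  have hflat : (PySem.List.pyRange 0 r 1).foldl (fun st i =>
      (PySem.List.pyRange 0 c 1).foldl (fun st j => pvStepA (pvS num r c) r c st (i, j)) st)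
      (0, ((pvS num r c).length : Int) - 1, m0)
      = (pvGrid r c).foldl (pvStepA (pvS num r c) r c)
          (0, ((pvS num r c).length : Int) - 1, m0) := by
    unfold pvGrid
    rw [List.foldl_flatMap]
    congr 1
    funext acc i
    rw [List.foldl_map]
  rw [hflat, pv_foldA]
  -- the permutation between the two association lists
  have hperm0 := pv_assocA_perm (pvS num r c) r c (pvGrid r c) 0 (((pvS num r c).length : Int) - 1)
  have hperm : (pvAssocA (pvS num r c) r c (pvGrid r c) 0 (((pvS num r c).length : Int) - 1)).Perm
      ((pvP r c).zip (pvV num r c)) := by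
    rw [pv_V_eq_S, pv_zip_eq]
    refine hperm0.trans ?_
    refine List.Perm.append_left _ ?_
    rw [show (pvGrid r c).filter (pvBack r c) = pvK r c from rfl, pv_desc_eq]
    exact List.reverse_perm _
  have hkeys : ((pvAssocA (pvS num r c) r c (pvGrid r c) 0
      (((pvS num r c).length : Int) - 1)).map Prod.fst).Perm (pvF r c ++ pvK r c) := by
    have h := hperm0.map Prod.fst
    rwa [List.map_append, pv_map_fst_withAsc, pv_map_fst_withDesc] at h
  refine pv_foldl_apply_perm _ _ hperm (hkeys.nodup_iff.mpr (pv_nodup_FK r c)) ?_ m0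
  intro a ha
  have hmem : a.1 ∈ pvF r c ++ pvK r c :=
    hkeys.mem_iff.mp (List.mem_map_of_mem ha)
  rcases List.mem_append.mp hmem with h | h
  · exact pvGrid_mem r c a.1 (List.mem_of_mem_filter h)
  · exact pvGrid_mem r c a.1 (List.mem_of_mem_filter h)

-- B's path is the front cells in row-major order followed by the reversed back cells
theorem pv_path_eq (r c : Int) (hr : 0 < r) (hc : 0 < c) :
    ((PySem.List.pyRange 0 c 1).map (fun j => ((0 : Int), j)))
      ++ ((PySem.List.pyRange 1 r 1).map (fun i => (i, c - 1)))
      ++ (if 1 < r then (PySem.List.pyRange (c - 2) (-1) (-1)).map (fun j => (r - 1, j)) else [])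
      ++ (if 1 < c then (PySem.List.pyRange (r - 2) 0 (-1)).map (fun i => (i, (0 : Int))) else [])
    = pvP r c := by
  unfold pvP pvF pvK
  rw [pv_filter_front r c hr hc, pv_filter_back r c hr hc, List.reverse_append]
  have hbot : (if 1 < r then (PySem.List.pyRange (c - 2) (-1) (-1)).map (fun j => (r - 1, j)) else [])
      = (if 1 < r then (PySem.List.pyRange 0 (c - 1) 1).map (fun j => (r - 1, j)) else []).reverse := by
    split_ifs with h
    · rw [PySem.List.pyRange_neg_one_eq_reverse, ← List.map_reverse,
        show (-1 : Int) + 1 = 0 from by norm_num, show c - 2 + 1 = c - 1 from by ring]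
    · rfl
  have hleft : (if 1 < c then (PySem.List.pyRange (r - 2) 0 (-1)).map (fun i => (i, (0 : Int))) else [])
      = (if 1 < c then (PySem.List.pyRange 1 (r - 1) 1).map (fun i => (i, (0 : Int))) else []).reverse := by
    split_ifs with h
    · rw [PySem.List.pyRange_neg_one_eq_reverse, ← List.map_reverse,
        show (0 : Int) + 1 = 1 from by norm_num, show r - 2 + 1 = r - 1 from by ring]
    · rfl
  rw [hbot, hleft]
  simp [List.append_assoc]

-- main equality
theorem pv_main (num : List (List Int)) (r : Int) (c : Int) :
    getSortedBoundary num r c = getSortedBoundary_alt num r c := by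
  by_cases hrc : 0 < r ∧ 0 < c
  · obtain ⟨hr, hc⟩ := hrc
    simp only [getSortedBoundary, getSortedBoundary_alt]
    rw [if_pos (⟨hr, hc⟩ : 0 < r ∧ 0 < c)]
    rw [pv_rearranged_eq num r c, pv_path_eq r c hr hc]
    exact pv_core num r c (num.map (fun row => row))
  · have h' : r ≤ 0 ∨ c ≤ 0 := by omega
    simp only [getSortedBoundary, getSortedBoundary_alt]
    rw [if_neg hrc]
    simp only [List.zip_nil_left, List.foldl_nil]
    rcases h' with h | h
    · rw [PySem.List.pyRange_one_eq_nil h]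
      simp
    · have e : PySem.List.pyRange 0 c 1 = [] := PySem.List.pyRange_one_eq_nil h
      simp only [e, List.foldl_nil, pv_foldl_const]

-- ===== VERDICT (by name: the statement is the Claim_ definition above) =====
theorem getSortedBoundary_spec : Claim_equal_getSortedBoundary := by
  intro num r c _ _
  unfold Spec_getSortedBoundary
  exact pv_main num r c
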